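-- pv_equiv track=rewrite | github.com/rotemwiessman/Ex6_with_seggev | wave_editor.py | average_pairs
-- ===== SOURCE A (Python) =====
-- def average_pairs(list_of_lists):
--     """
--     gets list of two lists and calculate the average of every argument in
--     these lists.
--     returns list with the averages
--     :param list_of_lists: list of lists
--     :return: average (list)
--     """
--     if list_of_lists == []:
--         return []
--     average = [0, 0]
--     for pair in range(len(list_of_lists)):
--         average[0] += list_of_lists[pair][0]
--         average[1] += list_of_lists[pair][1]
--     average[0] = int(average[0]/len(list_of_lists))
--     average[1] = int(average[1]/len(list_of_lists))
--     return average
-- ===== SOURCE B (Python) =====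
-- def average_pairs(list_of_lists):
--     """Divide-and-conquer reimplementation: each column sum is computed by
--     recursively splitting the list in halves (a balanced tree reduction)
--     instead of a linear index loop; same truncating int(sum/len) result."""
--     if list_of_lists == []:
--         return []
--
--     def colsum(lst, j):
--         if len(lst) == 1:
--             return lst[0][j]
--         mid = len(lst) // 2
--         return colsum(lst[:mid], j) + colsum(lst[mid:], j)
--
--     n = len(list_of_lists)
--     return [int(colsum(list_of_lists, 0) / n), int(colsum(list_of_lists, 1) / n)]
-- ===== Notes on version B (the rewrite author's own statement) =====
-- stated objective: alternative
-- what changed: Replaces A's single linear index-accumulating loop with a divide-and-conquer tree reduction: each column sum is computed by recursively splitting the list into halves and adding the two half-sums.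
import Mathlib
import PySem

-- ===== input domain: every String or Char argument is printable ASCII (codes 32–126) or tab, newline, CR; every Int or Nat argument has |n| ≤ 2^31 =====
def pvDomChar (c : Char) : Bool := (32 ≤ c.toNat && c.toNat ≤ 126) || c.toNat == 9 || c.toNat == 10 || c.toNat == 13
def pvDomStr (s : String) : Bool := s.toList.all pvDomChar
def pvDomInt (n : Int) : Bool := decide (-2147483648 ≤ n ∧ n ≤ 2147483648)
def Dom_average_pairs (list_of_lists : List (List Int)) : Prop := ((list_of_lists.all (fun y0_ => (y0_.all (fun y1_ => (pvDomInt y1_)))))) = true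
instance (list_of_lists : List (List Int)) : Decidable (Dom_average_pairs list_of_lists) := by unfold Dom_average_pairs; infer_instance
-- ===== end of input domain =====

-- B replaces A's linear index-accumulating loop with a divide-and-conquer tree
-- reduction of each column (recursive split into halves); objective: alternative.

-- ===== PORT A =====
-- int(average/len) is ported with PySem.Int.truncdiv (= int(a / b)).
def average_pairs (list_of_lists : List (List Int)) : List Int :=
  if list_of_lists = [] then []
  else
    let n : Int := list_of_lists.length
    let average :=
      (PySem.List.pyRange 0 n 1).foldl
        (fun (a : Int × Int) pair =>
          (a.1 + PySem.List.pyGetD (PySem.List.pyGetD list_of_lists pair []) 0 0,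
           a.2 + PySem.List.pyGetD (PySem.List.pyGetD list_of_lists pair []) 1 0))
        (0, 0)
    [PySem.Int.truncdiv average.1 n, PySem.Int.truncdiv average.2 n]

-- ===== PORT B =====
-- colsum(lst, j): divide-and-conquer column sum, as in Source B.  The `l.length ≤ 1`
-- guard makes the recursion total (Python's base case is len == 1; the empty
-- list is never reached from a nonempty top-level input).
def pvColsum (l : List (List Int)) (j : Nat) : Int :=
  if h : l.length ≤ 1 then
    PySem.List.pyGetD (PySem.List.pyGetD l 0 []) j 0
  else
    let mid := l.length / 2
    pvColsum (l.take mid) j + pvColsum (l.drop mid) j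
termination_by l.length
decreasing_by
  · simp only [List.length_take]; omega
  · simp only [List.length_drop]; omega

def average_pairs_alt (list_of_lists : List (List Int)) : List Int :=
  if list_of_lists = [] then []
  else
    let n : Int := list_of_lists.length
    [PySem.Int.truncdiv (pvColsum list_of_lists 0) n,
     PySem.Int.truncdiv (pvColsum list_of_lists 1) n]

-- ===== PRECONDITION & SPEC =====
-- Pre_ excludes exactly the inputs where Python A raises IndexError: a row with fewer than 2 items.
def Pre_average_pairs (list_of_lists : List (List Int)) : Prop :=
  ∀ row ∈ list_of_lists, 2 ≤ row.length
instance (list_of_lists : List (List Int)) : Decidable (Pre_average_pairs list_of_lists) := by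
  unfold Pre_average_pairs; infer_instance
def pvWitness_average_pairs : List (List Int) := [[1, 2], [3, 4]]
def Spec_average_pairs (list_of_lists : List (List Int)) (out : List Int) : Prop := out = average_pairs_alt list_of_lists
instance (list_of_lists : List (List Int)) (out : List Int) : Decidable (Spec_average_pairs list_of_lists out) := by unfold Spec_average_pairs; infer_instance

-- ===== CLAIM (what is proved, stated in full; the proofs are below) =====
def Claim_equal_average_pairs : Prop := ∀ (list_of_lists : List (List Int)), Dom_average_pairs list_of_lists → Pre_average_pairs list_of_lists → Spec_average_pairs list_of_lists (average_pairs list_of_lists)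

-- ===== LEMMAS AND PROOFS =====

-- A's pair-accumulating fold is the pair of column sums.
theorem foldl_pair_sum (g0 g1 : List Int → Int) (l : List (List Int)) (x y : Int) :
    l.foldl (fun (a : Int × Int) row => (a.1 + g0 row, a.2 + g1 row)) (x, y)
      = (x + (l.map g0).sum, y + (l.map g1).sum) := by
  induction l generalizing x y with
  | nil => simp
  | cons r rs ih => rw [List.foldl_cons, ih]; simp [add_assoc]

-- the divide-and-conquer column sum equals the column sum
theorem pvColsum_eq (l : List (List Int)) (j : Nat) :
    pvColsum l j = (l.map (fun row => PySem.List.pyGetD row j 0)).sum := by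
  unfold pvColsum
  split
  · rename_i h
    match l, h with
    | [], _ => simp [PySem.List.pyGetD, PySem.List.pyGet?]
    | [r], _ => simp [PySem.List.pyGetD_zero]
  · simp only []
    rw [pvColsum_eq (l.take (l.length / 2)) j, pvColsum_eq (l.drop (l.length / 2)) j,
        ← List.sum_append, ← List.map_append, List.take_append_drop]
termination_by l.length
decreasing_by
  · simp only [List.length_take]; omega
  · simp only [List.length_drop]; omega

-- ===== VERDICT (by name: the statement is the Claim_ definition above) =====
theorem average_pairs_spec : Claim_equal_average_pairs := by
  intro l _ _
  unfold Spec_average_pairs average_pairs average_pairs_alt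
  by_cases hne : l = []
  · simp [hne]
  · simp only [if_neg hne]
    have h1 :
        (PySem.List.pyRange 0 (l.length : Int) 1).foldl
          (fun (a : Int × Int) pair =>
            (a.1 + PySem.List.pyGetD (PySem.List.pyGetD l pair []) 0 0,
             a.2 + PySem.List.pyGetD (PySem.List.pyGetD l pair []) 1 0)) (0, 0)
        = l.foldl
            (fun (a : Int × Int) row =>
              (a.1 + PySem.List.pyGetD row 0 0, a.2 + PySem.List.pyGetD row 1 0)) (0, 0) :=
      PySem.List.foldl_pyRange_zero_pyGetD l ([] : List Int)
        (fun (a : Int × Int) (row : List Int) =>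
          (a.1 + PySem.List.pyGetD row 0 0, a.2 + PySem.List.pyGetD row 1 0)) (0, 0)
    rw [h1, foldl_pair_sum, pvColsum_eq l 0, pvColsum_eq l 1]
    simp
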